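-- pv_equiv track=rewrite | github.com/sergei-grechanik/ikup | tupimage/cli.py | parse_as_id
-- ===== SOURCE A (Python) =====
-- from typing import Optional, List
--
-- def parse_as_id(image: str) -> Optional[int]:
--     """Parse the argument as an ID of one of the following forms:
--     - A decimal number
--     - A hexadecimal number starting with '0x'
--     - 'id:' followed by a number
--     """
--     if image.startswith("id:"):
--         return parse_as_id(image[3:])
--     try:
--         if image.startswith("0x"):
--             return int(image, 16)
--         return int(image)
--     except ValueError:
--         return None
-- ===== SOURCE B (Python) =====
-- from typing import Optional
--
-- def parse_as_id(image: str) -> Optional[int]: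
--     while image.startswith("id:"):
--         image = image[3:]
--     try:
--         return int(image, 16) if image.startswith("0x") else int(image)
--     except ValueError:
--         return None
-- ===== Notes on version B (the rewrite author's own statement) =====
-- stated objective: idiomatic
-- what changed: Replaced the self-recursive id-prefix handling with an iterative while-loop that strips all stacked id prefixes first, then a single separate parse step (hex vs decimal).
import Mathlib
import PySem

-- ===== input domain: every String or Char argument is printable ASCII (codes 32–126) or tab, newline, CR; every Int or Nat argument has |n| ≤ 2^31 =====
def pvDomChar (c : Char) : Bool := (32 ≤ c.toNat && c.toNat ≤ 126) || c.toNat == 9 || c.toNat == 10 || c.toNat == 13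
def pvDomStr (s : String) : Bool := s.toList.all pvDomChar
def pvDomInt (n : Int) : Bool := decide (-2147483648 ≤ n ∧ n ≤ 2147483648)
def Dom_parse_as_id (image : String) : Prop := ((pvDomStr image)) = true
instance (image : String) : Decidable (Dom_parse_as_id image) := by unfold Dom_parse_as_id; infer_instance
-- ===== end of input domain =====

-- B replaces A's self-recursion on 'id:' by an explicit while-loop stripping phase
-- followed by one separate parse step (idiomatic; return value identical).

-- slicing off a present "id:" prefix shortens the character list (termination of both ports)
theorem pvDrop3_lt (cs : List Char) (h : PySem.Chars.startswith cs ['i','d',':'] = true) :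
    (PySem.List.slice cs (some 3) none).length < cs.length := by
  have hp := (PySem.Chars.startswith_iff cs ['i','d',':']).mp h
  have hlen : 3 ≤ cs.length := by
    have := hp.length_le; simpa using this
  have h3 : (some (3:Int)) = some ((3:Nat):Int) := by norm_num
  rw [h3, PySem.List.slice_from_natCast]
  simp only [List.length_drop]
  omega

-- ===== PORT A =====
def parse_as_id_charsA (cs : List Char) : Option Int :=
  if h : PySem.Chars.startswith cs ['i','d',':'] then
    parse_as_id_charsA (PySem.List.slice cs (some 3) none)
  else if PySem.Chars.startswith cs ['0','x'] then
    PySem.Int.ofCharsBase? cs 16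
  else
    PySem.Int.ofChars? cs
termination_by cs.length
decreasing_by exact pvDrop3_lt cs h

def parse_as_id (image : String) : Option Int :=
  parse_as_id_charsA image.toList

-- ===== PORT B =====
-- the while-loop: image = image[3:] as long as image starts with "id:"
def pvStripIds (cs : List Char) : List Char :=
  if h : PySem.Chars.startswith cs ['i','d',':'] then
    pvStripIds (PySem.List.slice cs (some 3) none)
  else cs
termination_by cs.length
decreasing_by exact pvDrop3_lt cs h

def parse_as_id_alt (image : String) : Option Int :=
  let cs := pvStripIds image.toList
  if PySem.Chars.startswith cs ['0','x'] then PySem.Int.ofCharsBase? cs 16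
  else PySem.Int.ofChars? cs

-- ===== PRECONDITION & SPEC =====
def Spec_parse_as_id (image : String) (out : Option Int) : Prop := out = parse_as_id_alt image
instance (image : String) (out : Option Int) : Decidable (Spec_parse_as_id image out) := by unfold Spec_parse_as_id; infer_instance

-- ===== CLAIM (what is proved, stated in full; the proofs are below) =====
def Claim_equal_parse_as_id : Prop := ∀ (image : String), Dom_parse_as_id image → Spec_parse_as_id image (parse_as_id image)

-- ===== LEMMAS AND PROOFS =====
theorem pvCharsA_eq (cs : List Char) :
    parse_as_id_charsA cs =
      (if PySem.Chars.startswith (pvStripIds cs) ['0','x'] then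
        PySem.Int.ofCharsBase? (pvStripIds cs) 16
      else PySem.Int.ofChars? (pvStripIds cs)) := by
  fun_induction parse_as_id_charsA cs with
  | case1 cs h ih =>
      rw [pvStripIds]
      simp only [h, dite_true]
      exact ih
  | case2 cs h h2 =>
      rw [pvStripIds]
      simp [h, h2]
  | case3 cs h h2 =>
      rw [pvStripIds]
      simp [h, h2]

-- ===== VERDICT (by name: the statement is the Claim_ definition above) =====
theorem parse_as_id_spec : Claim_equal_parse_as_id := by
  intro image _
  unfold Spec_parse_as_id parse_as_id parse_as_id_alt
  exact pvCharsA_eq image.toList
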